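-- pv_equiv track=rewrite | github.com/akarmain/vanilla_code | Competitions/Codeforces Round/Codeforces Round 894 (Div. 3)/A Ковёр в подарок.py | check_carpet
-- ===== SOURCE A (Python) =====
-- def check_carpet(n, k, carpet):
--     for col1 in range(k):
--         for col2 in range(col1 + 1, k):
--             for col3 in range(col2 + 1, k):
--                 for col4 in range(col3 + 1, k):
--                     column1 = [carpet[i][col1] for i in range(n)]
--                     column2 = [carpet[i][col2] for i in range(n)]
--                     column3 = [carpet[i][col3] for i in range(n)]
--                     column4 = [carpet[i][col4] for i in range(n)]
--
--                     if "v" in column1 and "i" in column2 and "k" in column3 and "a" in column4: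
--                         return "YES"
--     return "NO"
-- ===== SOURCE B (Python) =====
-- def check_carpet(n, k, carpet):
--     if k < 4:
--         return "NO"
--     target = "vika"
--     pos = 0
--     for c in range(k):
--         if pos < 4 and any(carpet[i][c] == target[pos] for i in range(n)):
--             pos += 1
--     return "YES" if pos == 4 else "NO"
-- ===== Notes on version B (the rewrite author's own statement) =====
-- stated objective: faster
-- what changed: Replaced the quadruple nested loop over all column 4-tuples (rebuilding each column per tuple) by a single greedy left-to-right scan of the columns matching the subsequence 'vika'.
-- outside the precondition, e.g. on check_carpet(1, 5, [['v', 'i', 'k', 'a']]): A returns 'YES', B returns 'YES'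
import Mathlib
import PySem

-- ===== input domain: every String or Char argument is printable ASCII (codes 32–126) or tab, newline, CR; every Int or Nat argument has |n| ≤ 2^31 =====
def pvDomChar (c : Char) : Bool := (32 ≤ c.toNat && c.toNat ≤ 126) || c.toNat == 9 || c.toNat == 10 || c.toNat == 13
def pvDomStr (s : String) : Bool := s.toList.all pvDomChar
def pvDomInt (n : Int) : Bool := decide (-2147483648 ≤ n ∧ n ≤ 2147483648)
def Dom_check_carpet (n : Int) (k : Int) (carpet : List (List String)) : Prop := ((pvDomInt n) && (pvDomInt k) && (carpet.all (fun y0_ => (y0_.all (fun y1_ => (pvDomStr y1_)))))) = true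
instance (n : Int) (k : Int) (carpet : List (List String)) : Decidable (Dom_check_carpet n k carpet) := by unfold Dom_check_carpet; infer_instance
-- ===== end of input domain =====

-- B replaces A's O(k^4*n) scan of all column 4-tuples by a single greedy O(k*n) left-to-right
-- column scan matching the subsequence "vika" (objective: faster, asymptotic).


-- ===== PORT A =====
-- carpet[i][c]; the getD defaults are only reachable outside Pre_check_carpet (Python raises there)
def pvEnt (carpet : List (List String)) (i c : Int) : String :=
  (PySem.List.pyGet? ((PySem.List.pyGet? carpet i).getD []) c).getD ""

-- columnX = [carpet[i][colX] for i in range(n)]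
def pvColA (n : Int) (carpet : List (List String)) (c : Int) : List String :=
  (PySem.List.pyRange 0 n 1).map (fun i => pvEnt carpet i c)

def check_carpet (n : Int) (k : Int) (carpet : List (List String)) : String :=
  if (PySem.List.pyRange 0 k 1).any (fun col1 =>
      (PySem.List.pyRange (col1 + 1) k 1).any (fun col2 =>
      (PySem.List.pyRange (col2 + 1) k 1).any (fun col3 =>
      (PySem.List.pyRange (col3 + 1) k 1).any (fun col4 =>
        (pvColA n carpet col1).contains "v" && (pvColA n carpet col2).contains "i" &&
        (pvColA n carpet col3).contains "k" && (pvColA n carpet col4).contains "a"))))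
  then "YES" else "NO"

-- ===== PORT B =====
-- loop body: if pos < 4 and any(carpet[i][c] == target[pos] for i in range(n)): pos += 1
def pvStepB (n : Int) (carpet : List (List String)) (pos c : Int) : Int :=
  if decide (pos < 4) && (PySem.List.pyRange 0 n 1).any
      (fun i => pvEnt carpet i c == ((PySem.Str.pyGet? "vika" pos).map String.singleton).getD "")
  then pos + 1 else pos

def check_carpet_alt (n : Int) (k : Int) (carpet : List (List String)) : String :=
  if k < 4 then "NO"
  else
    let pos := (PySem.List.pyRange 0 k 1).foldl (pvStepB n carpet) 0
    if pos == 4 then "YES" else "NO"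

-- ===== PRECONDITION & SPEC =====
-- Pre_ excludes inputs where an accessed entry carpet[i][col] (i < n, col < k, only possible when
-- k ≥ 4) can be out of range — Python raises IndexError there; on a few such ragged inputs A still
-- returns "YES" before reaching the bad access (cited in claim.json).
def Pre_check_carpet (n : Int) (k : Int) (carpet : List (List String)) : Prop :=
  4 ≤ k → (n ≤ (carpet.length : Int) ∧ ∀ row ∈ carpet.take n.toNat, k ≤ (row.length : Int))
instance (n : Int) (k : Int) (carpet : List (List String)) : Decidable (Pre_check_carpet n k carpet) := by
  unfold Pre_check_carpet; infer_instance

def pvWitness_check_carpet : Int × Int × List (List String) := (1, 4, [["v", "i", "k", "a"]])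

def Spec_check_carpet (n : Int) (k : Int) (carpet : List (List String)) (out : String) : Prop := out = check_carpet_alt n k carpet
instance (n : Int) (k : Int) (carpet : List (List String)) (out : String) : Decidable (Spec_check_carpet n k carpet out) := by unfold Spec_check_carpet; infer_instance

-- ===== CLAIM (what is proved, stated in full; the proofs are below) =====
def Claim_equal_check_carpet : Prop := ∀ (n : Int) (k : Int) (carpet : List (List String)), Dom_check_carpet n k carpet → Pre_check_carpet n k carpet → Spec_check_carpet n k carpet (check_carpet n k carpet)

-- ===== LEMMAS AND PROOFS =====

-- "ch occurs in column c (rows 0..n-1)"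
def pvHas (n : Int) (carpet : List (List String)) (c : Int) (ch : String) : Bool :=
  (PySem.List.pyRange 0 n 1).any (fun i => pvEnt carpet i c == ch)

def pvL : List String := ["v", "i", "k", "a"]

-- the first j letters of "vika" can be matched on strictly increasing columns below b
def pvMT (n : Int) (carpet : List (List String)) : Int → Nat → Prop
  | _, 0 => True
  | b, j + 1 => ∃ c : Int, 0 ≤ c ∧ c < b ∧ pvHas n carpet c (pvL.getD j "") = true ∧ pvMT n carpet c j

def pvG (n : Int) (carpet : List (List String)) (b : Int) : Int :=
  (PySem.List.pyRange 0 b 1).foldl (pvStepB n carpet) 0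

theorem pvContains_eq (n : Int) (carpet : List (List String)) (c : Int) (ch : String) :
    (pvColA n carpet c).contains ch = pvHas n carpet c ch := by
  rw [Bool.eq_iff_iff]
  simp only [List.contains_iff_mem, pvColA, pvHas, List.mem_map, List.any_eq_true,
             PySem.List.mem_pyRange_one, beq_iff_eq]

theorem pvMT_mono {n : Int} {carpet : List (List String)} {b b' : Int} (j : Nat)
    (h : pvMT n carpet b j) (hbb : b ≤ b') : pvMT n carpet b' j := by
  cases j with
  | zero => trivial
  | succ j =>
    obtain ⟨c, h0, hlt, hc, hm⟩ := h
    exact ⟨c, h0, by omega, hc, hm⟩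

theorem pvMT_le {n : Int} {carpet : List (List String)} :
    ∀ (j : Nat) {b : Int}, pvMT n carpet b (j + 1) → (j : Int) + 1 ≤ b := by
  intro j
  induction j with
  | zero => rintro b ⟨c, h0, hlt, _, _⟩; omega
  | succ j ih =>
    rintro b ⟨c, h0, hlt, _, hm⟩
    have := ih hm
    push_cast
    omega

theorem pvMT4_iff (n : Int) (carpet : List (List String)) (b : Int) :
    pvMT n carpet b 4 ↔
      ∃ c4 : Int, 0 ≤ c4 ∧ c4 < b ∧ pvHas n carpet c4 "a" = true ∧
      ∃ c3 : Int, 0 ≤ c3 ∧ c3 < c4 ∧ pvHas n carpet c3 "k" = true ∧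
      ∃ c2 : Int, 0 ≤ c2 ∧ c2 < c3 ∧ pvHas n carpet c2 "i" = true ∧
      ∃ c1 : Int, 0 ≤ c1 ∧ c1 < c2 ∧ pvHas n carpet c1 "v" = true := by
  constructor
  · rintro ⟨c4, h1, h2, h3, c3, h4, h5, h6, c2, h7, h8, h9, c1, h10, h11, h12, -⟩
    exact ⟨c4, h1, h2, h3, c3, h4, h5, h6, c2, h7, h8, h9, c1, h10, h11, h12⟩
  · rintro ⟨c4, h1, h2, h3, c3, h4, h5, h6, c2, h7, h8, h9, c1, h10, h11, h12⟩
    exact ⟨c4, h1, h2, h3, c3, h4, h5, h6, c2, h7, h8, h9, c1, h10, h11, h12, trivial⟩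

theorem pvACond_iff (n k : Int) (carpet : List (List String)) :
    ((PySem.List.pyRange 0 k 1).any (fun col1 =>
      (PySem.List.pyRange (col1 + 1) k 1).any (fun col2 =>
      (PySem.List.pyRange (col2 + 1) k 1).any (fun col3 =>
      (PySem.List.pyRange (col3 + 1) k 1).any (fun col4 =>
        (pvColA n carpet col1).contains "v" && (pvColA n carpet col2).contains "i" &&
        (pvColA n carpet col3).contains "k" && (pvColA n carpet col4).contains "a")))) = true)
    ↔ pvMT n carpet k 4 := by
  rw [pvMT4_iff]
  simp only [List.any_eq_true, PySem.List.mem_pyRange_one, Bool.and_eq_true, pvContains_eq]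
  constructor
  · rintro ⟨c1, ⟨h1a, h1b⟩, c2, ⟨h2a, h2b⟩, c3, ⟨h3a, h3b⟩, c4, ⟨h4a, h4b⟩, ⟨⟨⟨hv, hi⟩, hk⟩, ha⟩⟩
    exact ⟨c4, by omega, h4b, ha, c3, by omega, by omega, hk, c2, by omega, by omega, hi,
           c1, h1a, by omega, hv⟩
  · rintro ⟨c4, h40, h4b, ha, c3, h30, h34, hk, c2, h20, h23, hi, c1, h10, h12, hv⟩
    exact ⟨c1, ⟨h10, by omega⟩, c2, ⟨by omega, by omega⟩, c3, ⟨by omega, by omega⟩,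
           c4, ⟨by omega, h4b⟩, ⟨⟨⟨hv, hi⟩, hk⟩, ha⟩⟩

theorem pvStep_ge (n : Int) (carpet : List (List String)) (pos c : Int) :
    pos ≤ pvStepB n carpet pos c := by
  unfold pvStepB; split <;> omega

theorem pvStep_le4 (n : Int) (carpet : List (List String)) {pos : Int} (c : Int)
    (h : pos ≤ 4) : pvStepB n carpet pos c ≤ 4 := by
  unfold pvStepB
  split
  · next hc =>
    simp only [Bool.and_eq_true, decide_eq_true_eq] at hc
    omega
  · omega

theorem pvG_bounds (n : Int) (carpet : List (List String)) (b : Int) :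
    0 ≤ pvG n carpet b ∧ pvG n carpet b ≤ 4 := by
  unfold pvG
  have : ∀ (cs : List Int) (p : Int), 0 ≤ p → p ≤ 4 →
      0 ≤ cs.foldl (pvStepB n carpet) p ∧ cs.foldl (pvStepB n carpet) p ≤ 4 := by
    intro cs
    induction cs with
    | nil => intro p h0 h4; exact ⟨h0, h4⟩
    | cons c cs ih =>
      intro p h0 h4
      exact ih _ (le_trans h0 (pvStep_ge n carpet p c)) (pvStep_le4 n carpet c h4)
  exact this _ 0 (by omega) (by omega)

theorem pvG_succ (n : Int) (carpet : List (List String)) {b : Int} (hb : 0 ≤ b) :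
    pvG n carpet (b + 1) = pvStepB n carpet (pvG n carpet b) b := by
  unfold pvG
  rw [PySem.List.pyRange_one_succ_right hb, List.foldl_append]
  rfl

theorem pvTarget (j : Nat) (hj : j < 4) :
    ((PySem.Str.pyGet? "vika" (j : Int)).map String.singleton).getD "" = pvL.getD j "" := by
  interval_cases j <;> decide

theorem pvMain (n : Int) (carpet : List (List String)) :
    ∀ (m : Nat) (j : Nat), j ≤ 4 → (pvMT n carpet (m : Int) j ↔ (j : Int) ≤ pvG n carpet m) := by
  intro m
  induction m with
  | zero =>
    intro j hj
    have hG : pvG n carpet ((0 : Nat) : Int) = 0 := by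
      unfold pvG
      rw [PySem.List.pyRange_one_eq_nil (by norm_num)]
      rfl
    rw [hG]
    cases j with
    | zero => simp [pvMT]
    | succ j =>
      constructor
      · rintro ⟨c, h0, hlt, _, _⟩
        norm_num at hlt
        omega
      · intro h; push_cast at h; omega
  | succ m ih =>
    intro j hj
    have hcast : ((m + 1 : Nat) : Int) = (m : Int) + 1 := by push_cast; omega
    have hgrow : pvG n carpet ((m + 1 : Nat) : Int) = pvStepB n carpet (pvG n carpet m) m := by
      rw [hcast]; exact pvG_succ n carpet (by exact Int.natCast_nonneg _)
    have hB := pvG_bounds n carpet m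
    constructor
    · intro hMT
      cases j with
      | zero =>
        rw [hgrow]
        have := pvStep_ge n carpet (pvG n carpet m) m
        push_cast
        omega
      | succ j =>
        obtain ⟨c, h0, hlt, hc, hm⟩ := hMT
        rw [hcast] at hlt
        rw [hgrow]
        by_cases hcm : c < (m : Int)
        · have : (j : Int) + 1 ≤ pvG n carpet m := by
            have := (ih (j + 1) hj).mp ⟨c, h0, hcm, hc, hm⟩
            push_cast at this ⊢
            omega
          have := pvStep_ge n carpet (pvG n carpet m) m
          push_cast
          omega
        · have hceq : c = (m : Int) := by omega
          rw [hceq] at hc hm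
          have hj' : (j : Int) ≤ pvG n carpet m := by
            have := (ih j (by omega)).mp hm
            omega
          by_cases hdone : (j : Int) + 1 ≤ pvG n carpet m
          · have := pvStep_ge n carpet (pvG n carpet m) (m : Int)
            push_cast
            omega
          · have hgj : pvG n carpet m = (j : Int) := by omega
            have hfire : pvStepB n carpet (pvG n carpet m) (m : Int) = pvG n carpet m + 1 := by
              unfold pvStepB
              rw [if_pos]
              rw [Bool.and_eq_true, decide_eq_true_eq]
              refine ⟨by omega, ?_⟩
              show pvHas n carpet (m : Int) _ = true
              rw [hgj, pvTarget j (by omega)]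
              exact hc
            rw [hfire, hgj]
            push_cast
            omega
    · intro hle
      cases j with
      | zero => trivial
      | succ j =>
        rw [hgrow] at hle
        by_cases hprev : (j : Int) + 1 ≤ pvG n carpet m
        · have : pvMT n carpet (m : Int) (j + 1) := (ih (j + 1) hj).mpr (by push_cast; omega)
          exact pvMT_mono (j + 1) this (by omega)
        · -- the step must have fired, with pvG m = j
          have hfired : (decide (pvG n carpet m < 4) && (PySem.List.pyRange 0 n 1).any
              (fun i => pvEnt carpet i (m : Int) ==
                ((PySem.Str.pyGet? "vika" (pvG n carpet m)).map String.singleton).getD "")) = true := by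
            by_contra hnot
            rw [Bool.not_eq_true] at hnot
            unfold pvStepB at hle
            rw [hnot] at hle
            simp at hle
            omega
          have hstep : pvStepB n carpet (pvG n carpet m) m = pvG n carpet m + 1 := by
            unfold pvStepB
            rw [if_pos hfired]
          rw [hstep] at hle
          have hgj : pvG n carpet m = (j : Int) := by omega
          rw [Bool.and_eq_true] at hfired
          have hhas : pvHas n carpet (m : Int) (pvL.getD j "") = true := by
            have hh : pvHas n carpet (m : Int)
                (((PySem.Str.pyGet? "vika" (pvG n carpet m)).map String.singleton).getD "") = true :=
              hfired.2
            rwa [hgj, pvTarget j (by omega)] at hh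
          exact ⟨(m : Int), by exact Int.natCast_nonneg _, by omega, hhas,
                 (ih j (by omega)).mpr (by omega)⟩

theorem pvA_cases (n k : Int) (carpet : List (List String)) :
    (check_carpet n k carpet = "YES" ∧ pvMT n carpet k 4) ∨
    (check_carpet n k carpet = "NO" ∧ ¬ pvMT n carpet k 4) := by
  unfold check_carpet
  split
  · next h => exact Or.inl ⟨rfl, (pvACond_iff n k carpet).mp h⟩
  · next h => exact Or.inr ⟨rfl, fun hm => h ((pvACond_iff n k carpet).mpr hm)⟩

-- ===== VERDICT (by name: the statement is the Claim_ definition above) =====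
theorem check_carpet_spec : Claim_equal_check_carpet := by
  intro n k carpet _ _
  unfold Spec_check_carpet
  by_cases hk : k < 4
  · rcases pvA_cases n k carpet with ⟨hA, hMT⟩ | ⟨hA, _⟩
    · exfalso
      have := pvMT_le 3 hMT
      omega
    · rw [hA]
      unfold check_carpet_alt
      rw [if_pos hk]
  · have hm : ((k.toNat : Nat) : Int) = k := by omega
    have hmain := pvMain n carpet k.toNat 4 (by omega)
    rw [hm] at hmain
    have hB := pvG_bounds n carpet k
    unfold check_carpet_alt
    rw [if_neg hk]
    rcases pvA_cases n k carpet with ⟨hA, hMT⟩ | ⟨hA, hMT⟩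
    · rw [hA]
      have h4 : pvG n carpet k = 4 := by
        have := hmain.mp hMT
        omega
      show _ = if (pvG n carpet k == 4) = true then "YES" else "NO"
      rw [if_pos (by rw [h4]; rfl)]
    · rw [hA]
      have h4 : pvG n carpet k ≠ 4 := by
        intro h
        exact hMT (hmain.mpr (by omega))
      show _ = if (pvG n carpet k == 4) = true then "YES" else "NO"
      rw [if_neg (by simpa using h4)]
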